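-- pv_equiv track=rewrite | github.com/orlandoacevedo/confilter | confilter/perceptions.py | calc_conas
-- ===== SOURCE A (Python) =====
-- def calc_conas(nlist):
--     """calc all angles connections based on given list
--     Args:
--         nlist: 1D List[int]
--     """
--     if len(nlist) < 3: return []
--     cona = []
--     i = 0
--     while i < len(nlist):
--         j = i + 1
--         while j < len(nlist):
--             k = j + 1
--             while k < len(nlist):
--                 # center index i
--                 if nlist[j] < nlist[k]:
--                     cona.append([nlist[j], nlist[i], nlist[k]])
--                 else:
--                     cona.append([nlist[k], nlist[i], nlist[j]])
--                 # center index j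
--                 if nlist[i] < nlist[k]:
--                     cona.append([nlist[i], nlist[j], nlist[k]])
--                 else:
--                     cona.append([nlist[k], nlist[j], nlist[i]])
--                 # center index k
--                 if nlist[j] < nlist[i]:
--                     cona.append([nlist[j], nlist[k], nlist[i]])
--                 else:
--                     cona.append([nlist[i], nlist[k], nlist[j]])
--                 k += 1
--             j += 1
--         i += 1
--     return cona
-- ===== SOURCE B (Python) =====
-- def _pairs(idx):
--     # all index pairs (a, b) with a before b, recursively on the head
--     if not idx:
--         return []
--     h, rest = idx[0], idx[1:]
--     return [(h, r) for r in rest] + _pairs(rest)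
--
--
-- def _triples(idx):
--     # all index triples (i, j, k) with i before j before k, in lexicographic order
--     if not idx:
--         return []
--     h, rest = idx[0], idx[1:]
--     return [(h, a, b) for (a, b) in _pairs(rest)] + _triples(rest)
--
--
-- def _row(nlist, center, a, b):
--     lo, hi = (a, b) if nlist[a] < nlist[b] else (b, a)
--     return [nlist[lo], nlist[center], nlist[hi]]
--
--
-- def calc_conas(nlist):
--     if len(nlist) < 3:
--         return []
--     rows = []
--     for i, j, k in _triples(list(range(len(nlist)))):
--         rows.append(_row(nlist, i, j, k))
--         rows.append(_row(nlist, j, i, k))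
--         rows.append(_row(nlist, k, i, j))
--     return rows
-- ===== Notes on version B (the rewrite author's own statement) =====
-- stated objective: simpler
-- what changed: Replaces the three nested while loops with index counters and three spelled-out if/else append blocks by a recursive generation of all index triples plus one parameterised row rule (pick the two endpoints, order them by value, put the center in the middle) applied to the three center choices.
import Mathlib
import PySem

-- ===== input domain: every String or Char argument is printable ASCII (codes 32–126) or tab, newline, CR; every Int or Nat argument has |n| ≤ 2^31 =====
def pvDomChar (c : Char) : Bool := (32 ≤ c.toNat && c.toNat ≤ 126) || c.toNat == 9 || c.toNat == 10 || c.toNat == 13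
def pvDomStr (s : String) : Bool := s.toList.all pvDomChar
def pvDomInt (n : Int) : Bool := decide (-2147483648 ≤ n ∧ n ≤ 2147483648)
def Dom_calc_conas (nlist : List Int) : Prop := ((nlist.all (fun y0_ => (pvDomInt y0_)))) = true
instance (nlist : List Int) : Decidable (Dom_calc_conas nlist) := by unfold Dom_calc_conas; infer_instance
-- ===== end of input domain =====

-- B replaces A's three nested while loops and three unrolled if/else append blocks by a
-- recursive triple generator plus one parameterised row rule (objective: simpler).

-- ===== PORT A =====
-- A's `while i < len: ... i += 1` counter loops are transcribed as folds over the same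
-- index sequences (List.range / List.range'); indices are always in range, so nlist[x]
-- is ported as getD (exact here).
def calc_conas (nlist : List Int) : List (List Int) :=
  if nlist.length < 3 then []
  else
    (List.range nlist.length).foldl (fun cona i =>
      (List.range' (i+1) (nlist.length - (i+1))).foldl (fun cona j =>
        (List.range' (j+1) (nlist.length - (j+1))).foldl (fun cona k =>
          -- center index i
          let cona := if nlist.getD j 0 < nlist.getD k 0
            then cona ++ [[nlist.getD j 0, nlist.getD i 0, nlist.getD k 0]]
            else cona ++ [[nlist.getD k 0, nlist.getD i 0, nlist.getD j 0]]
          -- center index j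
          let cona := if nlist.getD i 0 < nlist.getD k 0
            then cona ++ [[nlist.getD i 0, nlist.getD j 0, nlist.getD k 0]]
            else cona ++ [[nlist.getD k 0, nlist.getD j 0, nlist.getD i 0]]
          -- center index k
          if nlist.getD j 0 < nlist.getD i 0
            then cona ++ [[nlist.getD j 0, nlist.getD k 0, nlist.getD i 0]]
            else cona ++ [[nlist.getD i 0, nlist.getD k 0, nlist.getD j 0]]
        ) cona) cona) []

-- ===== PORT B =====
def pvPairs : List Nat → List (Nat × Nat)
  | [] => []
  | h :: rest => rest.map (fun r => (h, r)) ++ pvPairs rest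

def pvTriples : List Nat → List (Nat × Nat × Nat)
  | [] => []
  | h :: rest => (pvPairs rest).map (fun p => (h, p.1, p.2)) ++ pvTriples rest

def pvRow (nlist : List Int) (center a b : Nat) : List Int :=
  let lh := if nlist.getD a 0 < nlist.getD b 0 then (a, b) else (b, a)
  [nlist.getD lh.1 0, nlist.getD center 0, nlist.getD lh.2 0]

def calc_conas_alt (nlist : List Int) : List (List Int) :=
  if nlist.length < 3 then []
  else
    (pvTriples (List.range nlist.length)).foldl (fun rows t =>
      rows ++ [pvRow nlist t.1 t.2.1 t.2.2,
               pvRow nlist t.2.1 t.1 t.2.2,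
               pvRow nlist t.2.2 t.1 t.2.1]) []

-- ===== PRECONDITION & SPEC =====
def Spec_calc_conas (nlist : List Int) (out : List (List Int)) : Prop := out = calc_conas_alt nlist
instance (nlist : List Int) (out : List (List Int)) : Decidable (Spec_calc_conas nlist out) := by unfold Spec_calc_conas; infer_instance

-- ===== CLAIM (what is proved, stated in full; the proofs are below) =====
def Claim_equal_calc_conas : Prop := ∀ (nlist : List Int), Dom_calc_conas nlist → Spec_calc_conas nlist (calc_conas nlist)

-- ===== LEMMAS AND PROOFS =====

-- A's three rows for the triple (i, j, k)
def rowsA (nlist : List Int) (i j k : Nat) : List (List Int) :=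
  (if nlist.getD j 0 < nlist.getD k 0
    then [[nlist.getD j 0, nlist.getD i 0, nlist.getD k 0]]
    else [[nlist.getD k 0, nlist.getD i 0, nlist.getD j 0]]) ++
  (if nlist.getD i 0 < nlist.getD k 0
    then [[nlist.getD i 0, nlist.getD j 0, nlist.getD k 0]]
    else [[nlist.getD k 0, nlist.getD j 0, nlist.getD i 0]]) ++
  (if nlist.getD j 0 < nlist.getD i 0
    then [[nlist.getD j 0, nlist.getD k 0, nlist.getD i 0]]
    else [[nlist.getD i 0, nlist.getD k 0, nlist.getD j 0]])

-- B's three rows for the triple (i, j, k)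
def rowsB (nlist : List Int) (i j k : Nat) : List (List Int) :=
  [pvRow nlist i j k, pvRow nlist j i k, pvRow nlist k i j]

theorem rowsA_eq_rowsB (nlist : List Int) (i j k : Nat) :
    rowsA nlist i j k = rowsB nlist i j k := by
  simp only [rowsA, rowsB, pvRow]
  split_ifs <;> simp_all <;> omega

theorem innerA_eq (nlist : List Int) (i j k : Nat) (cona : List (List Int)) :
    (let c1 := if nlist.getD j 0 < nlist.getD k 0
        then cona ++ [[nlist.getD j 0, nlist.getD i 0, nlist.getD k 0]]
        else cona ++ [[nlist.getD k 0, nlist.getD i 0, nlist.getD j 0]];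
     let c2 := if nlist.getD i 0 < nlist.getD k 0
        then c1 ++ [[nlist.getD i 0, nlist.getD j 0, nlist.getD k 0]]
        else c1 ++ [[nlist.getD k 0, nlist.getD j 0, nlist.getD i 0]];
     if nlist.getD j 0 < nlist.getD i 0
        then c2 ++ [[nlist.getD j 0, nlist.getD k 0, nlist.getD i 0]]
        else c2 ++ [[nlist.getD i 0, nlist.getD k 0, nlist.getD j 0]])
    = cona ++ rowsA nlist i j k := by
  simp only [rowsA]
  split_ifs <;> simp

-- A as a nested flatMap of rowsA
theorem calc_conas_flatMap (nlist : List Int) (h : ¬ nlist.length < 3) :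
    calc_conas nlist =
      (List.range nlist.length).flatMap (fun i =>
        (List.range' (i+1) (nlist.length - (i+1))).flatMap (fun j =>
          (List.range' (j+1) (nlist.length - (j+1))).flatMap (fun k =>
            rowsA nlist i j k))) := by
  unfold calc_conas
  rw [if_neg h]
  have : ∀ (cona : List (List Int)),
      (List.range nlist.length).foldl (fun cona i =>
        (List.range' (i+1) (nlist.length - (i+1))).foldl (fun cona j =>
          (List.range' (j+1) (nlist.length - (j+1))).foldl (fun cona k =>
            let c1 := if nlist.getD j 0 < nlist.getD k 0
              then cona ++ [[nlist.getD j 0, nlist.getD i 0, nlist.getD k 0]]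
              else cona ++ [[nlist.getD k 0, nlist.getD i 0, nlist.getD j 0]];
            let c2 := if nlist.getD i 0 < nlist.getD k 0
              then c1 ++ [[nlist.getD i 0, nlist.getD j 0, nlist.getD k 0]]
              else c1 ++ [[nlist.getD k 0, nlist.getD j 0, nlist.getD i 0]];
            if nlist.getD j 0 < nlist.getD i 0
              then c2 ++ [[nlist.getD j 0, nlist.getD k 0, nlist.getD i 0]]
              else c2 ++ [[nlist.getD i 0, nlist.getD k 0, nlist.getD j 0]]
          ) cona) cona) cona
      = cona ++ (List.range nlist.length).flatMap (fun i =>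
          (List.range' (i+1) (nlist.length - (i+1))).flatMap (fun j =>
            (List.range' (j+1) (nlist.length - (j+1))).flatMap (fun k =>
              rowsA nlist i j k))) := by
    intro cona
    have hk : ∀ i j (c : List (List Int)),
        (List.range' (j+1) (nlist.length - (j+1))).foldl (fun cona k =>
            let c1 := if nlist.getD j 0 < nlist.getD k 0
              then cona ++ [[nlist.getD j 0, nlist.getD i 0, nlist.getD k 0]]
              else cona ++ [[nlist.getD k 0, nlist.getD i 0, nlist.getD j 0]];
            let c2 := if nlist.getD i 0 < nlist.getD k 0
              then c1 ++ [[nlist.getD i 0, nlist.getD j 0, nlist.getD k 0]]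
              else c1 ++ [[nlist.getD k 0, nlist.getD j 0, nlist.getD i 0]];
            if nlist.getD j 0 < nlist.getD i 0
              then c2 ++ [[nlist.getD j 0, nlist.getD k 0, nlist.getD i 0]]
              else c2 ++ [[nlist.getD i 0, nlist.getD k 0, nlist.getD j 0]]) c
        = c ++ (List.range' (j+1) (nlist.length - (j+1))).flatMap (fun k => rowsA nlist i j k) := by
      intro i j c
      have := PySem.List.foldl_append_eq_flatMap
        (l := List.range' (j+1) (nlist.length - (j+1)))
        (g := fun k => rowsA nlist i j k) (acc := c)
      rw [← this]
      apply PySem.List.foldl_congr_mem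
      intro c' k _
      exact innerA_eq nlist i j k c'
    have hj : ∀ i (c : List (List Int)),
        (List.range' (i+1) (nlist.length - (i+1))).foldl (fun cona j =>
          (List.range' (j+1) (nlist.length - (j+1))).foldl (fun cona k =>
            let c1 := if nlist.getD j 0 < nlist.getD k 0
              then cona ++ [[nlist.getD j 0, nlist.getD i 0, nlist.getD k 0]]
              else cona ++ [[nlist.getD k 0, nlist.getD i 0, nlist.getD j 0]];
            let c2 := if nlist.getD i 0 < nlist.getD k 0
              then c1 ++ [[nlist.getD i 0, nlist.getD j 0, nlist.getD k 0]]
              else c1 ++ [[nlist.getD k 0, nlist.getD j 0, nlist.getD i 0]];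
            if nlist.getD j 0 < nlist.getD i 0
              then c2 ++ [[nlist.getD j 0, nlist.getD k 0, nlist.getD i 0]]
              else c2 ++ [[nlist.getD i 0, nlist.getD k 0, nlist.getD j 0]]) cona) c
        = c ++ (List.range' (i+1) (nlist.length - (i+1))).flatMap (fun j =>
            (List.range' (j+1) (nlist.length - (j+1))).flatMap (fun k => rowsA nlist i j k)) := by
      intro i c
      have := PySem.List.foldl_append_eq_flatMap
        (l := List.range' (i+1) (nlist.length - (i+1)))
        (g := fun j => (List.range' (j+1) (nlist.length - (j+1))).flatMap (fun k => rowsA nlist i j k))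
        (acc := c)
      rw [← this]
      apply PySem.List.foldl_congr_mem
      intro c' j _
      exact hk i j c'
    have := PySem.List.foldl_append_eq_flatMap
      (l := List.range nlist.length)
      (g := fun i => (List.range' (i+1) (nlist.length - (i+1))).flatMap (fun j =>
        (List.range' (j+1) (nlist.length - (j+1))).flatMap (fun k => rowsA nlist i j k)))
      (acc := cona)
    rw [← this]
    apply PySem.List.foldl_congr_mem
    intro c' i _
    exact hj i c'
  simpa using this []

-- B as a flatMap of rowsB over pvTriples
theorem calc_conas_alt_flatMap (nlist : List Int) (h : ¬ nlist.length < 3) :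
    calc_conas_alt nlist
      = (pvTriples (List.range nlist.length)).flatMap
          (fun t => rowsB nlist t.1 t.2.1 t.2.2) := by
  unfold calc_conas_alt
  rw [if_neg h]
  have := PySem.List.foldl_append_eq_flatMap
    (l := pvTriples (List.range nlist.length))
    (g := fun t => rowsB nlist t.1 t.2.1 t.2.2) (acc := ([] : List (List Int)))
  simpa [rowsB] using this

-- pvPairs of a range, as a nested flatMap
theorem pvPairs_range' (m : Nat) : ∀ (s : Nat) (g : Nat × Nat → List (List Int)),
    (pvPairs (List.range' s m)).flatMap g
      = (List.range' s m).flatMap (fun j =>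
          (List.range' (j+1) (s + m - (j+1))).flatMap (fun k => g (j, k))) := by
  induction m with
  | zero => intro s g; simp [pvPairs]
  | succ m ih =>
    intro s g
    rw [List.range'_succ]
    simp only [pvPairs, List.flatMap_cons, List.flatMap_append, List.flatMap_map]
    have h1 : s + (m + 1) - (s + 1) = m := by omega
    rw [h1, ih (s+1) g]
    congr 1
    apply List.flatMap_congr
    intro j hj
    have : s + 1 + m = s + (m + 1) := by omega
    rw [this]

-- pvTriples of a range, as a nested flatMap
theorem pvTriples_range' (m : Nat) : ∀ (s : Nat) (g : Nat × Nat × Nat → List (List Int)),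
    (pvTriples (List.range' s m)).flatMap g
      = (List.range' s m).flatMap (fun i =>
          (List.range' (i+1) (s + m - (i+1))).flatMap (fun j =>
            (List.range' (j+1) (s + m - (j+1))).flatMap (fun k => g (i, j, k)))) := by
  induction m with
  | zero => intro s g; simp [pvTriples]
  | succ m ih =>
    intro s g
    rw [List.range'_succ]
    simp only [pvTriples, List.flatMap_cons, List.flatMap_append, List.flatMap_map]
    have h1 : s + (m + 1) - (s + 1) = m := by omega
    rw [h1, ih (s+1) g]
    congr 1
    · rw [pvPairs_range' m (s+1) (fun p => g (s, p.1, p.2))]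
      apply List.flatMap_congr
      intro j hj
      have : s + 1 + m = s + (m + 1) := by omega
      rw [this]
    · apply List.flatMap_congr
      intro i hi
      have : s + 1 + m = s + (m + 1) := by omega
      rw [this]

-- ===== VERDICT (by name: the statement is the Claim_ definition above) =====
theorem calc_conas_spec : Claim_equal_calc_conas := by
  intro nlist _
  unfold Spec_calc_conas
  by_cases h : nlist.length < 3
  · unfold calc_conas calc_conas_alt
    rw [if_pos h, if_pos h]
  · rw [calc_conas_flatMap nlist h, calc_conas_alt_flatMap nlist h]
    have hr : List.range nlist.length = List.range' 0 nlist.length := by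
      simp [List.range_eq_range']
    rw [hr, pvTriples_range' nlist.length 0 (fun t => rowsB nlist t.1 t.2.1 t.2.2)]
    simp only [Nat.zero_add]
    apply List.flatMap_congr
    intro i _
    apply List.flatMap_congr
    intro j _
    apply List.flatMap_congr
    intro k _
    exact rowsA_eq_rowsB nlist i j k
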